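-- pv_equiv track=rewrite | github.com/B-UMMI/Schema_Refinery | SchemaRefinery/AdaptLoci/Legacy_code/AdaptLoci.py | distribute_loci
-- ===== SOURCE A (Python) =====
-- from typing import List, Tuple, Dict, Callable, Any, Union
--
-- def distribute_loci(inputs: List[Tuple[str, int, int, int, int]], cores: int, method: str) -> List[List[str]]:
--     """Create balanced lists of loci to efficiently parallelize function calls.
--
--     Creates balanced lists of loci to distribute per number of
--     available cores. Loci lists can be created based on the number
--     of sequences per locus (seqcount), the mean length of the
--     sequences (length) in each locus or the product of both values
--     (seqcount+length).
--
--     Parameters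
--     ----------
--     inputs : list
--         List with one sublist per locus. Each sublist has
--         a locus identifier, the total number of sequences
--         and sequence mean length for that locus.
--     cores : int
--         The number of loci groups that should be created.
--         Based on the number of CPU cores that will be
--         used to process the inputs.
--     method : str
--         "seqcount" to create loci lists based on the total
--         number of sequences, "length" to split based
--         on mean length of sequences and "seqcount+length" to
--         split based on both criteria.
--
--     Returns
--     -------
--     splitted_ids : list
--         List with sublists that contain loci identifiers.
--         Sublists are balanced based on the chosen method.
--     """
--     splitted_ids: List[List[str]] = [[] for _ in range(cores)]
--     splitted_values: List[int] = [0 for _ in range(cores)]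
--     i: int = 0
--     for locus in inputs:
--         if method == 'seqcount':
--             splitted_values[i] += locus[1]
--         elif method == 'length':
--             splitted_values[i] += locus[4]
--         elif method == 'seqcount+length':
--             splitted_values[i] += locus[1] * locus[4]
--         splitted_ids[i].append(locus[0])
--         i = splitted_values.index(min(splitted_values))
--
--     return splitted_ids
-- ===== SOURCE B (Python) =====
-- def distribute_loci(inputs, cores, method):
--     """Same distribution as A, but keeps the buckets in a sorted priority queue
--     of (load, bucket_index) pairs: the least-loaded bucket (lowest index on ties)
--     is always at the front, so each step pops it and re-inserts it in order."""
--     buckets = [[] for _ in range(cores)]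
--     queue = [(0, j) for j in range(cores)]  # kept sorted ascending
--     for locus in inputs:
--         value, j = queue.pop(0)
--         buckets[j].append(locus[0])
--         if method == 'seqcount':
--             value += locus[1]
--         elif method == 'length':
--             value += locus[4]
--         elif method == 'seqcount+length':
--             value += locus[1] * locus[4]
--         k = 0
--         while k < len(queue) and queue[k] <= (value, j):
--             k += 1
--         queue.insert(k, (value, j))
--     return buckets
-- ===== Notes on version B (the rewrite author's own statement) =====
-- stated objective: alternative
-- what changed: B keeps a sorted priority queue of (load, bucket) pairs and pops/re-inserts the least-loaded bucket, instead of A's per-locus rescan of the whole load list with min() + list.index().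
-- outside the precondition, e.g. on distribute_loci([('a', 1, 0, 0, 2)], 0, 'seqcount'): A raises IndexError, B raises IndexError
import Mathlib
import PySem

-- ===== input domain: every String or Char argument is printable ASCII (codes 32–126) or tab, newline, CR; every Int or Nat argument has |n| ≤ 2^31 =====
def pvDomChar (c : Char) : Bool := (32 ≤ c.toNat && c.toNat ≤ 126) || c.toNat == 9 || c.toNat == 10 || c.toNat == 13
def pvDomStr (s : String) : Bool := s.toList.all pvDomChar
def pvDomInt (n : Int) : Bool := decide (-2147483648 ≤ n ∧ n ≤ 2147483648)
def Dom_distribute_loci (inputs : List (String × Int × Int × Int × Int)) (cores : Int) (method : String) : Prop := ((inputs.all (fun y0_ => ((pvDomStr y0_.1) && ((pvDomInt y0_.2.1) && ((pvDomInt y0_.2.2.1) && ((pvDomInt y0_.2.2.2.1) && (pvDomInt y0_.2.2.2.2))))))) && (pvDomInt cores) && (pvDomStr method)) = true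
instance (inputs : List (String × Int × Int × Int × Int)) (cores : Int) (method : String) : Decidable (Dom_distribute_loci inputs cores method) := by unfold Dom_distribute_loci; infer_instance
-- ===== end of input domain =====

-- B replaces A's per-locus rescan (min + .index over the whole load list) by a sorted
-- priority queue of (load, bucket) pairs: pop the front, re-insert in order (alternative
-- decomposition; same results, return value only — A mutates no argument).

-- ===== PORT A =====
-- One loop iteration of A: add the locus' weight to bucket i, append its id,
-- then recompute i = splitted_values.index(min(splitted_values)).
-- The `.getD` fallbacks are never taken under Pre_ (i is always in range, the list
-- nonempty); where Python raises (cores ≤ 0 with a nonempty input) Pre_ excludes the input.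
def pvAStep (method : String) (st : List (List String) × List Int × Nat)
    (locus : String × Int × Int × Int × Int) : List (List String) × List Int × Nat :=
  let ids := st.1
  let values := st.2.1
  let i := st.2.2
  let values :=
    if method == "seqcount" then values.set i (values.getD i 0 + locus.2.1)
    else if method == "length" then values.set i (values.getD i 0 + locus.2.2.2.2)
    else if method == "seqcount+length" then values.set i (values.getD i 0 + locus.2.1 * locus.2.2.2.2)
    else values
  let ids := ids.set i (ids.getD i [] ++ [locus.1])
  let i := (PySem.List.index? values ((PySem.List.min? values (fun x => x)).getD 0)).getD 0
  (ids, values, i)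

def distribute_loci (inputs : List (String × Int × Int × Int × Int)) (cores : Int) (method : String) : List (List String) :=
  let n := cores.toNat   -- range(cores) is empty for cores ≤ 0
  (inputs.foldl (pvAStep method) (List.replicate n ([] : List String), List.replicate n (0 : Int), 0)).1

-- ===== PORT B =====
-- Python tuple comparison (value, j) <= (value', j') is lexicographic.
def pvPairLe (p q : Int × Nat) : Bool := decide (p.1 < q.1) || (p.1 == q.1 && decide (p.2 ≤ q.2))

-- Source B's while-loop insertion into the sorted queue: skip entries ≤ the new pair.
def pvInsert (p : Int × Nat) : List (Int × Nat) → List (Int × Nat)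
  | [] => [p]
  | q :: rest => if pvPairLe q p then q :: pvInsert p rest else p :: q :: rest

-- One loop iteration of B: pop the front of the sorted queue, append the id to that
-- bucket, re-insert the updated pair.  An empty queue is where Source B's queue.pop(0)
-- raises IndexError (cores ≤ 0 with a nonempty input); Pre_ excludes those inputs.
def pvBStep (method : String) (st : List (List String) × List (Int × Nat))
    (locus : String × Int × Int × Int × Int) : List (List String) × List (Int × Nat) :=
  match st.2 with
  | [] => st
  | (value, j) :: rest =>
    let buckets := st.1.set j (st.1.getD j [] ++ [locus.1])
    let value :=
      if method == "seqcount" then value + locus.2.1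
      else if method == "length" then value + locus.2.2.2.2
      else if method == "seqcount+length" then value + locus.2.1 * locus.2.2.2.2
      else value
    (buckets, pvInsert (value, j) rest)

def distribute_loci_alt (inputs : List (String × Int × Int × Int × Int)) (cores : Int) (method : String) : List (List String) :=
  let n := cores.toNat
  (inputs.foldl (pvBStep method) (List.replicate n ([] : List String), (List.range n).map (fun j => ((0 : Int), j)))).1

-- ===== PRECONDITION & SPEC =====
-- With cores ≤ 0 and a nonempty input, A raises IndexError (indexing an empty list)
-- and B raises IndexError (pop from an empty list); those inputs are excluded.
def Pre_distribute_loci (inputs : List (String × Int × Int × Int × Int)) (cores : Int) (method : String) : Prop :=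
  inputs = [] ∨ 1 ≤ cores

instance (inputs : List (String × Int × Int × Int × Int)) (cores : Int) (method : String) : Decidable (Pre_distribute_loci inputs cores method) := by unfold Pre_distribute_loci; infer_instance

def pvWitness_distribute_loci : (List (String × Int × Int × Int × Int)) × Int × String :=
  ([("a", 3, 0, 0, 2), ("b", 1, 0, 0, 5)], 2, "seqcount")

def Spec_distribute_loci (inputs : List (String × Int × Int × Int × Int)) (cores : Int) (method : String) (out : List (List String)) : Prop := out = distribute_loci_alt inputs cores method
instance (inputs : List (String × Int × Int × Int × Int)) (cores : Int) (method : String) (out : List (List String)) : Decidable (Spec_distribute_loci inputs cores method out) := by unfold Spec_distribute_loci; infer_instance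

-- ===== CLAIM (what is proved, stated in full; the proofs are below) =====
def Claim_equal_distribute_loci : Prop := ∀ (inputs : List (String × Int × Int × Int × Int)) (cores : Int) (method : String), Dom_distribute_loci inputs cores method → Pre_distribute_loci inputs cores method → Spec_distribute_loci inputs cores method (distribute_loci inputs cores method)

-- ===== LEMMAS AND PROOFS =====

-- pvPairLe is a linear order on pairs
theorem pvPairLe_total (p q : Int × Nat) (h : ¬ pvPairLe p q = true) : pvPairLe q p = true := by
  rcases p with ⟨a, i⟩; rcases q with ⟨b, j⟩
  simp [pvPairLe] at h ⊢; omega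

theorem pvPairLe_trans {p q r : Int × Nat} (h1 : pvPairLe p q = true) (h2 : pvPairLe q r = true) :
    pvPairLe p r = true := by
  rcases p with ⟨a, i⟩; rcases q with ⟨b, j⟩; rcases r with ⟨c, k⟩
  simp [pvPairLe] at h1 h2 ⊢; omega

theorem pvPairLe_antisymm {p q : Int × Nat} (h1 : pvPairLe p q = true) (h2 : pvPairLe q p = true) :
    p = q := by
  rcases p with ⟨a, i⟩; rcases q with ⟨b, j⟩
  simp [pvPairLe] at h1 h2
  have : a = b ∧ i = j := by omega
  simp [this.1, this.2]

-- pvInsert is an ordered insertion: permutation and sortedness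
theorem pvInsert_perm (p : Int × Nat) (l : List (Int × Nat)) : (pvInsert p l).Perm (p :: l) := by
  induction l with
  | nil => simp [pvInsert]
  | cons q rest ih =>
    simp only [pvInsert]
    split
    · exact ((ih.cons q).trans (List.Perm.swap p q rest)).symm.symm
    · exact List.Perm.refl _

theorem pvInsert_pairwise (p : Int × Nat) (l : List (Int × Nat))
    (h : l.Pairwise (fun a b => pvPairLe a b = true)) :
    (pvInsert p l).Pairwise (fun a b => pvPairLe a b = true) := by
  induction l with
  | nil => simp [pvInsert]
  | cons q rest ih =>
    rcases List.pairwise_cons.mp h with ⟨hq, hrest⟩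
    simp only [pvInsert]
    split
    · rename_i hle
      refine List.pairwise_cons.mpr ⟨?_, ih hrest⟩
      intro x hx
      have := (pvInsert_perm p rest).mem_iff.mp hx
      rcases List.mem_cons.mp this with rfl | hx'
      · exact hle
      · exact hq x hx'
    · rename_i hnle
      have hpq : pvPairLe p q = true := pvPairLe_total q p hnle
      refine List.pairwise_cons.mpr ⟨?_, h⟩
      intro x hx
      rcases List.mem_cons.mp hx with rfl | hx'
      · exact hpq
      · exact pvPairLe_trans hpq (hq x hx')

-- A's recomputed index, as one name
def pvArgmin (values : List Int) : Nat :=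
  (PySem.List.index? values ((PySem.List.min? values (fun x => x)).getD 0)).getD 0

-- The loop invariant tying A's state (values, i) to B's queue
def pvInv (values : List Int) (i : Nat) (queue : List (Int × Nat)) : Prop :=
  queue.Perm values.zipIdx ∧ queue.Pairwise (fun a b => pvPairLe a b = true) ∧ i = pvArgmin values

-- zipIdx after a point update
theorem zipIdx_set (l : List Int) (i : Nat) (v : Int) :
    (l.set i v).zipIdx = l.zipIdx.set i (v, i) := by
  apply List.ext_getElem
  · simp
  · intro k h1 h2
    simp [List.getElem_set, List.getElem_zipIdx]
    by_cases hk : i = k <;> simp [hk]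

-- The head of the sorted queue is (min values, first index of that min), i.e. A's pick
theorem pvInv_head (values : List Int) (i : Nat) (v : Int) (j : Nat) (rest : List (Int × Nat))
    (hne : values ≠ []) (hinv : pvInv values i ((v, j) :: rest)) :
    j = i ∧ i < values.length ∧ values[i]? = some v := by
  rcases hinv with ⟨hperm, hsort, hi⟩
  obtain ⟨m, hm⟩ : ∃ m, PySem.List.min? values (fun x => x) = some m := by
    cases h : PySem.List.min? values (fun x => x) with
    | none => exact absurd ((PySem.List.min?_eq_none_iff values _).mp h) hne
    | some m => exact ⟨m, rfl⟩
  have hmmem : m ∈ values := PySem.List.min?_mem hm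
  have hmin : ∀ y ∈ values, m ≤ y := by
    intro y hy; exact PySem.List.min?_isMin hm y hy
  obtain ⟨i0, hi0⟩ : ∃ i0, PySem.List.index? values m = some i0 := by
    cases h : PySem.List.index? values m with
    | none => exact absurd ((PySem.List.index?_eq_none_iff values m).mp h) (by simp [hmmem])
    | some i0 => exact ⟨i0, rfl⟩
  obtain ⟨hi0lt, hi0get, hi0first⟩ := PySem.List.getElem_of_index?_eq_some hi0
  have hiEq : i = i0 := by
    rw [hi]; unfold pvArgmin; rw [hm, Option.getD_some, hi0, Option.getD_some]
  -- (m, i0) is ≤ every element of values.zipIdx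
  have hminpair : ∀ p ∈ values.zipIdx, pvPairLe (m, i0) p = true := by
    intro p hp
    rcases p with ⟨y, k⟩
    have hk := List.mk_mem_zipIdx_iff_getElem?.mp hp
    have hklt : k < values.length := by
      by_contra hge
      simp [List.getElem?_eq_none (le_of_not_gt hge)] at hk
    have hky : values[k] = y := by
      rw [List.getElem?_eq_getElem hklt] at hk
      simpa using hk
    have hmy : m ≤ y := hky ▸ hmin _ (List.getElem_mem hklt)
    rcases lt_or_eq_of_le hmy with hlt | heq
    · simp [pvPairLe, hlt]
    · have : i0 ≤ k := by
        by_contra hgt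
        exact hi0first k (by omega) (by rw [hky, ← heq])
      simp [pvPairLe, heq, this]
  -- (m, i0) is in the queue; the head is ≤ it; antisymmetry
  have hmemq : (m, i0) ∈ (v, j) :: rest := by
    refine hperm.mem_iff.mpr (List.mk_mem_zipIdx_iff_getElem?.mpr ?_)
    rw [List.getElem?_eq_getElem hi0lt, hi0get]
  have hhead : pvPairLe (m, i0) (v, j) = true :=
    hminpair _ (hperm.mem_iff.mp (List.mem_cons_self))
  have hvj : (v, j) = (m, i0) := by
    rcases List.mem_cons.mp hmemq with h | h
    · exact h.symm
    · exact pvPairLe_antisymm (List.pairwise_cons.mp hsort |>.1 _ h) hhead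
  have hv : v = m := by simpa using congrArg Prod.fst hvj
  have hj : j = i0 := by simpa using congrArg Prod.snd hvj
  refine ⟨by omega, by omega, ?_⟩
  rw [hiEq, List.getElem?_eq_getElem hi0lt, hi0get, hv]

-- One synchronized step preserves the invariant and keeps the bucket lists equal
theorem pv_step (method : String) (locus : String × Int × Int × Int × Int)
    (ids : List (List String)) (values : List Int) (i : Nat) (queue : List (Int × Nat))
    (hne : values ≠ []) (hinv : pvInv values i queue) :
    (pvBStep method (ids, queue) locus).1 = (pvAStep method (ids, values, i) locus).1 ∧
    (pvAStep method (ids, values, i) locus).2.1.length = values.length ∧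
    pvInv (pvAStep method (ids, values, i) locus).2.1 (pvAStep method (ids, values, i) locus).2.2
      (pvBStep method (ids, queue) locus).2 := by
  rcases hq : queue with _ | ⟨⟨v, j⟩, rest⟩
  · exfalso
    rcases hinv with ⟨hperm, -, -⟩
    rw [hq] at hperm
    have := hperm.length_eq
    simp at this
    exact hne (List.eq_nil_of_length_eq_zero this.symm)
  subst hq
  obtain ⟨hji, hilt, higet⟩ := pvInv_head values i v j rest hne hinv
  subst hji
  rcases hinv with ⟨hperm, hsort, -⟩
  have hvi : values[j] = v := by
    rw [List.getElem?_eq_getElem hilt] at higet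
    simpa using higet
  have hvget : values.getD j 0 = v := by
    rw [List.getD_eq_getElem?_getD, higet]; rfl
  -- both steps update bucket j by the same weight w
  set w : Int :=
    if method == "seqcount" then locus.2.1
    else if method == "length" then locus.2.2.2.2
    else if method == "seqcount+length" then locus.2.1 * locus.2.2.2.2
    else 0 with hw
  have hval : (if method == "seqcount" then v + locus.2.1
      else if method == "length" then v + locus.2.2.2.2
      else if method == "seqcount+length" then v + locus.2.1 * locus.2.2.2.2
      else v) = v + w := by
    rw [hw]; split_ifs <;> simp
  have hAvals : (pvAStep method (ids, values, j) locus).2.1 = values.set j (v + w) := by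
    simp only [pvAStep, hw]
    split_ifs with h1 h2 h3
    · rw [hvget]
    · rw [hvget]
    · rw [hvget]
    · rw [add_zero, ← hvi]
      exact (List.set_getElem_self hilt).symm
  have hBqueue : (pvBStep method (ids, (v, j) :: rest) locus).2 = pvInsert (v + w, j) rest := by
    show pvInsert ((if method == "seqcount" then v + locus.2.1
      else if method == "length" then v + locus.2.2.2.2
      else if method == "seqcount+length" then v + locus.2.1 * locus.2.2.2.2
      else v), j) rest = pvInsert (v + w, j) rest
    rw [hval]
  have hBbuckets : (pvBStep method (ids, (v, j) :: rest) locus).1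
      = ids.set j (ids.getD j [] ++ [locus.1]) := by
    simp only [pvBStep]
  have hAids : (pvAStep method (ids, values, j) locus).1
      = ids.set j (ids.getD j [] ++ [locus.1]) := by
    simp only [pvAStep]
  refine ⟨by rw [hBbuckets, hAids], by rw [hAvals]; simp, ?_⟩
  rw [hAvals, hBqueue]
  -- the permutation part
  have hzlen : j < values.zipIdx.length := by simpa using hilt
  have hz_j : values.zipIdx[j] = (v, j) := by
    simp [List.getElem_zipIdx, hvi]
  have hrest : rest.Perm (values.zipIdx.eraseIdx j) := by
    have h1 : values.zipIdx.Perm ((v, j) :: values.zipIdx.eraseIdx j) := by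
      have := (List.getElem_cons_eraseIdx_perm hzlen).symm
      rwa [hz_j] at this
    exact (hperm.trans h1).cons_inv
  have hpermNew : (pvInsert (v + w, j) rest).Perm ((values.set j (v + w)).zipIdx) := by
    refine ((pvInsert_perm _ _).trans (hrest.cons _)).trans ?_
    rw [zipIdx_set]
    exact (List.set_perm_cons_eraseIdx hzlen _).symm
  refine ⟨hpermNew, pvInsert_pairwise _ _ (List.pairwise_cons.mp hsort).2, ?_⟩
  -- A's recomputed index is pvArgmin of A's new values, definitionally
  have h3 : (pvAStep method (ids, values, j) locus).2.2
      = pvArgmin ((pvAStep method (ids, values, j) locus).2.1) := rfl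
  rw [h3, hAvals]

-- The two folds keep equal bucket lists from any pair of invariant-linked states
theorem pv_fold (method : String) (inputs : List (String × Int × Int × Int × Int)) :
    ∀ (ids : List (List String)) (values : List Int) (i : Nat) (queue : List (Int × Nat)),
    values ≠ [] → pvInv values i queue →
    (inputs.foldl (pvBStep method) (ids, queue)).1
      = (inputs.foldl (pvAStep method) (ids, values, i)).1 := by
  induction inputs with
  | nil => intro ids values i queue _ _; rfl
  | cons locus rest ih =>
    intro ids values i queue hne hinv
    obtain ⟨hb, hlen, hinv'⟩ := pv_step method locus ids values i queue hne hinv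
    simp only [List.foldl_cons]
    have hne' : (pvAStep method (ids, values, i) locus).2.1 ≠ [] := by
      intro h
      rw [h] at hlen
      exact hne (List.eq_nil_of_length_eq_zero hlen.symm)
    have hB : pvBStep method (ids, queue) locus
        = ((pvAStep method (ids, values, i) locus).1, (pvBStep method (ids, queue) locus).2) := by
      rw [← hb]
    rw [hB]
    exact ih _ _ _ _ hne' hinv'

-- the initial queue of B is exactly zipIdx of the initial load list of A
theorem pv_init_queue (n : Nat) :
    (List.range n).map (fun j => ((0 : Int), j)) = (List.replicate n (0 : Int)).zipIdx := by
  apply List.ext_getElem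
  · simp
  · intro k h1 h2
    simp [List.getElem_zipIdx]

theorem pv_init_sorted (n : Nat) :
    ((List.range n).map (fun j => ((0 : Int), j))).Pairwise (fun a b => pvPairLe a b = true) := by
  rw [List.pairwise_map]
  exact List.pairwise_lt_range.imp (by intro a b h; simp [pvPairLe]; omega)

theorem pv_foldl_min_replicate (k : Nat) : (List.replicate k (0 : Int)).foldl min 0 = 0 := by
  induction k with
  | zero => rfl
  | succ k ih => rw [List.replicate_succ, List.foldl_cons, min_self]; exact ih

theorem pv_argmin_replicate (n : Nat) (hn : 0 < n) : pvArgmin (List.replicate n (0 : Int)) = 0 := by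
  obtain ⟨k, rfl⟩ : ∃ k, n = k + 1 := ⟨n - 1, by omega⟩
  unfold pvArgmin
  rw [List.replicate_succ, PySem.List.min?_id_cons, pv_foldl_min_replicate,
    Option.getD_some, PySem.List.index?_cons_self, Option.getD_some]

-- ===== VERDICT (by name: the statement is the Claim_ definition above) =====
theorem distribute_loci_spec : Claim_equal_distribute_loci := by
  intro inputs cores method _ hpre
  unfold Spec_distribute_loci
  rcases hpre with rfl | hcores
  · rfl
  · have hn : 0 < cores.toNat := by omega
    refine Eq.symm ?_
    unfold distribute_loci distribute_loci_alt
    refine pv_fold method inputs _ _ _ _ ?_ ?_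
    · simp [List.replicate_eq_nil_iff]; omega
    · refine ⟨?_, ?_, ?_⟩
      · rw [pv_init_queue]
      · exact pv_init_sorted _
      · exact (pv_argmin_replicate _ hn).symm
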